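-- pv_equiv track=rewrite | github.com/siakhooi/codility-fury-road-2022 | codility-solutions/solutions-1.py | solution
-- ===== SOURCE A (Python) =====
-- def cost(scooter, sand):
--     costs = [[20, 30], [5, 40]]
--     return costs[scooter][sand]
--
-- def solution(R):
--     n = len(R)
--     ans = n*100
--
--     for s in range(n+1):
--         c = 0
--         for i in range(n):
--             c += cost(i < s, R[i] == 'S')
--         ans = min(ans, c)
--
--     return ans
-- ===== SOURCE B (Python) =====
-- def solution(R):
--     # One pass with prefix deltas: cost of threshold 0 plus a running delta per
--     # character, tracking the minimum; O(n) instead of A's O(n^2).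
--     base = sum(30 if c == 'S' else 20 for c in R)
--     best = cur = base
--     for c in R:
--         cur += 10 if c == 'S' else -15
--         best = min(best, cur)
--     return best
-- ===== Notes on version B (the rewrite author's own statement) =====
-- stated objective: faster
-- what changed: Replaced the nested loop over all thresholds s (recomputing the full cost each time) with a single pass that starts from the cost of threshold 0 and maintains a running per-character delta, tracking the minimum.
import Mathlib
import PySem

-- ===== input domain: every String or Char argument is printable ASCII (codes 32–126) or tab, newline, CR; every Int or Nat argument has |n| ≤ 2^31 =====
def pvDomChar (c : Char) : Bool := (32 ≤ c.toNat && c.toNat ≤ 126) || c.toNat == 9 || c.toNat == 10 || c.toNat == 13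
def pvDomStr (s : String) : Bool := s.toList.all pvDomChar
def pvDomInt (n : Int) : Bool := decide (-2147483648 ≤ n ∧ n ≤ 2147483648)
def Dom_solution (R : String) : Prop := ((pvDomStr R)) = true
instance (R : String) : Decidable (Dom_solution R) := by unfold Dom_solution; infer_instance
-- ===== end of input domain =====

-- B replaces A's O(n^2) scan over every threshold by one O(n) pass with a running
-- per-character cost delta starting from the threshold-0 cost.

-- ===== PORT A =====
def cost (scooter sand : Bool) : Int :=
  let costs : List (List Int) := [[20, 30], [5, 40]]
  (costs.getD (if scooter then 1 else 0) []).getD (if sand then 1 else 0) 0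

def solution (R : String) : Int :=
  let n : Int := PySem.Str.len R
  let ans : Int := n * 100
  (PySem.List.pyRange 0 (n + 1) 1).foldl
    (fun ans s =>
      min ans
        ((PySem.List.pyRange 0 n 1).foldl
          (fun c i =>
            c + cost (decide (i < s)) (decide (PySem.List.pyGetD R.toList i ' ' = 'S'))) 0))
    ans

-- ===== PORT B =====
def solution_alt (R : String) : Int :=
  let base : Int := R.toList.foldl (fun a c => a + (if c = 'S' then 30 else 20)) 0
  let p : Int × Int := R.toList.foldl
    (fun p c =>
      let cur := p.2 + (if c = 'S' then 10 else -15)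
      (min p.1 cur, cur)) (base, base)
  p.1

-- ===== PRECONDITION & SPEC =====
def Spec_solution (R : String) (out : Int) : Prop := out = solution_alt R
instance (R : String) (out : Int) : Decidable (Spec_solution R out) := by unfold Spec_solution; infer_instance

-- ===== CLAIM (what is proved, stated in full; the proofs are below) =====
def Claim_equal_solution : Prop := ∀ (R : String), Dom_solution R → Spec_solution R (solution R)

-- ===== LEMMAS AND PROOFS =====

-- per-character cost with the scooter still at the shop (i ≥ s)
def f20 (c : Char) : Int := if c = 'S' then 30 else 20
-- per-character change of cost when the threshold moves past this character
def f10 (c : Char) : Int := if c = 'S' then 10 else -15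
def delta (M : List Char) : Int := (M.map f10).sum
-- minimum over all thresholds, starting from base cost b
def minCosts (b : Int) : List Char → Int
  | [] => b
  | c :: t => min b (minCosts (b + f10 c) t)

lemma delta_nil : delta [] = 0 := rfl
lemma delta_cons (c : Char) (t : List Char) : delta (c :: t) = f10 c + delta t := by
  simp [delta]

lemma cost_true (c : Char) : cost true (decide (c = 'S')) = f20 c + f10 c := by
  by_cases h : c = 'S' <;> simp [cost, f20, f10, h]

lemma cost_false (c : Char) : cost false (decide (c = 'S')) = f20 c := by
  by_cases h : c = 'S' <;> simp [cost, f20, h]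

lemma minCosts_le (b : Int) (M : List Char) : minCosts b M ≤ b := by
  cases M with
  | nil => simp [minCosts]
  | cons c t => simp [minCosts]

lemma sum_f20_le (L : List Char) : (L.map f20).sum ≤ (L.length : Int) * 100 := by
  induction L with
  | nil => simp
  | cons c t ih =>
    have : f20 c ≤ 30 := by by_cases h : c = 'S' <;> simp [f20, h]
    simp only [List.map_cons, List.sum_cons, List.length_cons]
    push_cast
    nlinarith

lemma map_h_pyGetD_zero (xs : List Char) (h : Char → Int) :
    (PySem.List.pyRange 0 (xs.length : Int) 1).map (fun i => h (PySem.List.pyGetD xs i ' '))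
      = xs.map h := by
  have : (fun i => h (PySem.List.pyGetD xs i ' '))
      = h ∘ (fun i => PySem.List.pyGetD xs i ' ') := rfl
  rw [this, ← List.map_map, PySem.List.map_pyGetD_pyRange_zero']

lemma map_h_pyGetD_from (xs : List Char) (h : Char → Int) (a : Int) (ha : 0 ≤ a) :
    (PySem.List.pyRange a (xs.length : Int) 1).map (fun i => h (PySem.List.pyGetD xs i ' '))
      = (xs.drop a.toNat).map h := by
  have : (fun i => h (PySem.List.pyGetD xs i ' '))
      = h ∘ (fun i => PySem.List.pyGetD xs i ' ') := rfl
  rw [this, ← List.map_map, PySem.List.map_pyGetD_pyRange' xs ' ' ha]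

-- A's inner loop: the cost of threshold s is the threshold-0 cost plus the prefix delta
lemma inner_eq (L : List Char) (s : Int) (h0 : 0 ≤ s) (h1 : s ≤ (L.length : Int)) :
    (PySem.List.pyRange 0 (L.length : Int) 1).foldl
      (fun c i => c + cost (decide (i < s)) (decide (PySem.List.pyGetD L i ' ' = 'S'))) 0
    = (L.map f20).sum + delta (L.take s.toNat) := by
  rw [PySem.List.foldl_add]
  rw [PySem.List.pyRange_one_append 0 s (L.length : Int) h0 h1]
  rw [List.map_append, List.sum_append]
  have hklen : ((L.take s.toNat).length : Int) = s := by
    simp [List.length_take]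
    omega
  have hpre :
      (PySem.List.pyRange 0 s 1).map
        (fun i => cost (decide (i < s)) (decide (PySem.List.pyGetD L i ' ' = 'S')))
      = (L.take s.toNat).map (fun c => f20 c + f10 c) := by
    have step1 :
        (PySem.List.pyRange 0 s 1).map
          (fun i => cost (decide (i < s)) (decide (PySem.List.pyGetD L i ' ' = 'S')))
        = (PySem.List.pyRange 0 s 1).map
            (fun i => (fun c => f20 c + f10 c) (PySem.List.pyGetD (L.take s.toNat) i ' ')) := by
      apply List.map_congr_left
      intro i hi
      rcases PySem.List.mem_pyRange_one.mp hi with ⟨hi0, hi1⟩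
      have hiL : i < (L.length : Int) := lt_of_lt_of_le hi1 h1
      have hget : PySem.List.pyGetD L i ' ' = PySem.List.pyGetD (L.take s.toNat) i ' ' := by
        rw [PySem.List.pyGetD_eq_getElem L ' ' hi0 (by simpa using hiL),
            PySem.List.pyGetD_eq_getElem (L.take s.toNat) ' ' hi0 (by rw [hklen]; exact hi1)]
        simp [List.getElem_take]
      simp only [hget, decide_eq_true hi1]
      rw [cost_true]
    rw [step1,
       show PySem.List.pyRange 0 s 1
           = PySem.List.pyRange 0 (((L.take s.toNat).length : Int)) 1 from by rw [hklen]]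
    exact map_h_pyGetD_zero (L.take s.toNat) (fun c => f20 c + f10 c)
  have hsuf :
      (PySem.List.pyRange s (L.length : Int) 1).map
        (fun i => cost (decide (i < s)) (decide (PySem.List.pyGetD L i ' ' = 'S')))
      = (L.drop s.toNat).map f20 := by
    have step1 :
        (PySem.List.pyRange s (L.length : Int) 1).map
          (fun i => cost (decide (i < s)) (decide (PySem.List.pyGetD L i ' ' = 'S')))
        = (PySem.List.pyRange s (L.length : Int) 1).map
            (fun i => f20 (PySem.List.pyGetD L i ' ')) := by
      apply List.map_congr_left
      intro i hi
      rcases PySem.List.mem_pyRange_one.mp hi with ⟨hi0, _⟩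
      have : decide (i < s) = false := by simp; omega
      rw [this, cost_false]
    rw [step1, map_h_pyGetD_from L f20 s h0]
  rw [hpre, hsuf]
  rw [PySem.List.sum_map_add_int]
  have : (L.map f20).sum = ((L.take s.toNat).map f20).sum + ((L.drop s.toNat).map f20).sum := by
    conv_lhs => rw [← List.take_append_drop s.toNat L]
    rw [List.map_append, List.sum_append]
  rw [this]
  unfold delta
  ring

lemma foldl_pyRange_succ {β : Type} (f : β → Int → β) (a : β) (lo hi : Int) :
    (PySem.List.pyRange (lo + 1) (hi + 1) 1).foldl f a
      = (PySem.List.pyRange lo hi 1).foldl (fun acc s => f acc (s + 1)) a := by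
  rw [PySem.List.pyRange_one, PySem.List.pyRange_one]
  have h : (hi + 1 - (lo + 1)) = hi - lo := by ring
  rw [h, List.foldl_map, List.foldl_map]
  apply PySem.List.foldl_congr_mem
  intro acc k _
  congr 1
  ring

-- A's outer loop computes min a (minCosts b L)
lemma outer_eq (L : List Char) (b a : Int) :
    (PySem.List.pyRange 0 ((L.length : Int) + 1) 1).foldl
      (fun acc s => min acc (b + delta (L.take s.toNat))) a
    = min a (minCosts b L) := by
  induction L generalizing b a with
  | nil =>
    simp only [List.length_nil, Nat.cast_zero, zero_add]
    rw [show PySem.List.pyRange 0 1 1 = [0] from rfl]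
    simp [minCosts, delta]
  | cons c t ih =>
    have hlen : ((c :: t).length : Int) + 1 = ((t.length : Int) + 1) + 1 := by
      simp
    rw [hlen]
    rw [PySem.List.pyRange_one_cons (by positivity)]
    simp only [List.foldl_cons]
    rw [show (0 : Int) + 1 = 0 + 1 from rfl]
    rw [foldl_pyRange_succ]
    have hcongr :
        (PySem.List.pyRange 0 ((t.length : Int) + 1) 1).foldl
          (fun acc s => min acc (b + delta ((c :: t).take (s + 1).toNat)))
          (min a (b + delta ((c :: t).take (0 : Int).toNat)))
        = (PySem.List.pyRange 0 ((t.length : Int) + 1) 1).foldl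
            (fun acc s => min acc ((b + f10 c) + delta (t.take s.toNat)))
            (min a (b + delta ((c :: t).take (0 : Int).toNat))) := by
      apply PySem.List.foldl_congr_mem
      intro acc s hs
      rcases PySem.List.mem_pyRange_one.mp hs with ⟨hs0, _⟩
      have h1 : (s + 1).toNat = s.toNat + 1 := by omega
      rw [h1, List.take_succ_cons, delta_cons]
      congr 1
      ring
    rw [hcongr, ih]
    have h0 : ((c :: t).take (0 : Int).toNat) = [] := by simp
    rw [h0, delta_nil]
    simp [minCosts, min_assoc]

-- B's fold computes min m (minCosts b M)
lemma bfold_eq (M : List Char) (m b : Int) :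
    (M.foldl
      (fun (p : Int × Int) c =>
        let cur := p.2 + (if c = 'S' then 10 else -15)
        (min p.1 cur, cur)) (min m b, b)).1
    = min m (minCosts b M) := by
  induction M generalizing m b with
  | nil => simp [minCosts]
  | cons c t ih =>
    simp only [List.foldl_cons]
    have hf : (if c = 'S' then (10 : Int) else -15) = f10 c := rfl
    rw [show (min (min m b) (b + (if c = 'S' then (10:Int) else -15)))
          = min (min m b) (b + f10 c) from by rw [hf]]
    rw [hf, ih]
    simp [minCosts, min_assoc]

lemma base_eq (L : List Char) :
    L.foldl (fun a c => a + (if c = 'S' then 30 else 20)) 0 = (L.map f20).sum := by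
  rw [PySem.List.foldl_add L (fun c => if c = 'S' then (30 : Int) else 20) 0]
  simp only [zero_add]
  rfl

-- ===== VERDICT (by name: the statement is the Claim_ definition above) =====
theorem solution_spec : Claim_equal_solution := by
  intro R _
  unfold Spec_solution solution solution_alt
  simp only [PySem.Str.len_eq]
  set L := R.toList with hL
  -- A side
  have hA :
      (PySem.List.pyRange 0 ((L.length : Int) + 1) 1).foldl
        (fun ans s =>
          min ans
            ((PySem.List.pyRange 0 (L.length : Int) 1).foldl
              (fun c i =>
                c + cost (decide (i < s)) (decide (PySem.List.pyGetD L i ' ' = 'S'))) 0))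
        ((L.length : Int) * 100)
      = min ((L.length : Int) * 100) (minCosts ((L.map f20).sum) L) := by
    have hcongr :
        (PySem.List.pyRange 0 ((L.length : Int) + 1) 1).foldl
          (fun ans s =>
            min ans
              ((PySem.List.pyRange 0 (L.length : Int) 1).foldl
                (fun c i =>
                  c + cost (decide (i < s)) (decide (PySem.List.pyGetD L i ' ' = 'S'))) 0))
          ((L.length : Int) * 100)
        = (PySem.List.pyRange 0 ((L.length : Int) + 1) 1).foldl
            (fun ans s => min ans ((L.map f20).sum + delta (L.take s.toNat)))
            ((L.length : Int) * 100) := by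
      apply PySem.List.foldl_congr_mem
      intro acc s hs
      rcases PySem.List.mem_pyRange_one.mp hs with ⟨hs0, hs1⟩
      rw [inner_eq L s hs0 (by omega)]
    rw [hcongr, outer_eq]
  have hmin : minCosts ((L.map f20).sum) L ≤ (L.length : Int) * 100 := by
    calc minCosts ((L.map f20).sum) L ≤ (L.map f20).sum := minCosts_le _ _
      _ ≤ (L.length : Int) * 100 := by have := sum_f20_le L; linarith
  rw [hA, min_eq_right hmin]
  -- B side
  rw [base_eq]
  have hB := bfold_eq L ((L.map f20).sum) ((L.map f20).sum)
  rw [min_self] at hB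
  rw [hB, min_eq_right (minCosts_le _ _)]
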